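-- pv_equiv track=rewrite | github.com/ccwienk/aoc-2023 | 03/03b.py | iter_adjacent_numbers
-- ===== SOURCE A (Python) =====
-- def iter_adjacent_numbers(
--     row,
--     col,
--     rows,
--     number_coordinates: list[list[tuple[int, int]]],
--     numbers,
-- ):
--     rows_count = len(rows)
--     cols_count = len(rows[0])
--
--     if row > 0:
--         check_above = True
--     else:
--         check_above = False
--
--     if row + 1 < rows_count:
--         check_below = True
--     else:
--         check_below =False
--
--     if col > 0:
--         check_left = True
--     else:
--         check_left = False
--
--     if col + 1 < cols_count:
--         check_right = True
--     else:
--         check_right = False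
--
--     for idx, number_coords in enumerate(number_coordinates):
--         number_coords: list[tuple[int,int]] # [(row, col)]
--         for nrow, ncol in number_coords:
--             if check_above and check_left:
--                 if (row-1, col-1) == (nrow, ncol):
--                     yield numbers[idx]
--                     break
--
--             if check_above:
--                 if (row-1, col) == (nrow, ncol):
--                     yield numbers[idx]
--                     break
--
--             if check_above and check_right:
--                 if (row-1,col+1) == (nrow, ncol):
--                     yield numbers[idx]
--                     break
--
--             if check_left:
--                 if (row,col-1) == (nrow, ncol):
--                     yield numbers[idx]
--                     break
--
--             if check_right:
--                 if (row,col+1) == (nrow, ncol):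
--                     yield numbers[idx]
--                     break
--
--             if check_below and check_left:
--                 if (row+1,col-1) == (nrow, ncol):
--                     yield numbers[idx]
--                     break
--
--             if check_below:
--                 if (row+1,col) == (nrow, ncol):
--                     yield numbers[idx]
--                     break
--
--             if check_below and check_right:
--                 if (row+1,col+1) == (nrow, ncol):
--                     yield numbers[idx]
--                     break
-- ===== SOURCE B (Python) =====
-- def iter_adjacent_numbers(
--     row,
--     col,
--     rows,
--     number_coordinates,
--     numbers,
-- ):
--     rows_count = len(rows)
--     cols_count = len(rows[0])
--     # invert the data: coordinate -> list of number indices occupying that cell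
--     index_at = {}
--     for idx, coords in enumerate(number_coordinates):
--         for cell in coords:
--             index_at[cell] = index_at.get(cell, []) + [idx]
--     # probe only the (at most 8) in-bounds neighbor cells of (row, col)
--     hits = set()
--     for dr in (-1, 0, 1):
--         if dr == -1 and not row > 0:
--             continue
--         if dr == 1 and not row + 1 < rows_count:
--             continue
--         for dc in (-1, 0, 1):
--             if dc == -1 and not col > 0:
--                 continue
--             if dc == 1 and not col + 1 < cols_count:
--                 continue
--             if dr == 0 and dc == 0:
--                 continue
--             for idx in index_at.get((row + dr, col + dc), []):
--                 hits.add(idx)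
--     # emit matching numbers in index order, each at most once (as A does)
--     for idx in sorted(hits):
--         yield numbers[idx]
-- ===== Notes on version B (the rewrite author's own statement) =====
-- stated objective: alternative
-- what changed: B inverts the data: one pass builds a coordinate-to-indices dict, then only the at-most-8 in-bounds neighbor cells of (row,col) are looked up and the hit numbers are emitted via sorted indices, replacing A's scan over every stored coordinate of every number with eight dict probes per query.
import Mathlib
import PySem

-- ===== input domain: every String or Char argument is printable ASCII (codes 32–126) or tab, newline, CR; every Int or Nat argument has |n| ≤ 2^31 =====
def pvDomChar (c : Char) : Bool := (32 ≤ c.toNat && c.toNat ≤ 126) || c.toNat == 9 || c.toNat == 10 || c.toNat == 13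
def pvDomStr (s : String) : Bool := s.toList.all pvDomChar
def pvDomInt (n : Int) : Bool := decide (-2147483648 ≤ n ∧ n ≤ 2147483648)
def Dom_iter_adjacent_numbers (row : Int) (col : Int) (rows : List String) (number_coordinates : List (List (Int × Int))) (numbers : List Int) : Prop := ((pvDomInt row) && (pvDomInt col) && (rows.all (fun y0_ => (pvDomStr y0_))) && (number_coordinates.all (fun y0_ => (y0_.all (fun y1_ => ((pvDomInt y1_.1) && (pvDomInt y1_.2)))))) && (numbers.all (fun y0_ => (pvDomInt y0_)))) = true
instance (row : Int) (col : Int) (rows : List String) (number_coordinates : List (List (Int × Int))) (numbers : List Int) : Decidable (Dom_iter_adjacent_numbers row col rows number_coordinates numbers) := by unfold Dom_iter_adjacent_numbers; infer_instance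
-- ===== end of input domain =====

-- B inverts the data: it builds a coordinate→indices dict once, probes only the ≤8
-- in-bounds neighbor cells of (row, col), and emits the hit numbers in index order —
-- replacing A's scan of every stored coordinate with eight dict lookups (alternative).

-- ===== PORT A =====
-- inner 'for nrow, ncol in number_coords' loop of A (each matching branch yields and breaks)
def pvInnerA (row col : Int) (ca cb cl cr : Bool) (v : Int) : List (Int × Int) → List Int
  | [] => []
  | (nrow, ncol) :: rest =>
    if ca && cl && decide ((row - 1, col - 1) = (nrow, ncol)) then [v]
    else if ca && decide ((row - 1, col) = (nrow, ncol)) then [v]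
    else if ca && cr && decide ((row - 1, col + 1) = (nrow, ncol)) then [v]
    else if cl && decide ((row, col - 1) = (nrow, ncol)) then [v]
    else if cr && decide ((row, col + 1) = (nrow, ncol)) then [v]
    else if cb && cl && decide ((row + 1, col - 1) = (nrow, ncol)) then [v]
    else if cb && decide ((row + 1, col) = (nrow, ncol)) then [v]
    else if cb && cr && decide ((row + 1, col + 1) = (nrow, ncol)) then [v]
    else pvInnerA row col ca cb cl cr v rest

-- outer 'for idx, number_coords in enumerate(number_coordinates)' loop of A
def pvLoopA (row col : Int) (ca cb cl cr : Bool) (numbers : List Int) :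
    Int → List (List (Int × Int)) → List Int
  | _, [] => []
  | idx, coords :: rest =>
      pvInnerA row col ca cb cl cr ((PySem.List.pyGet? numbers idx).getD 0) coords
        ++ pvLoopA row col ca cb cl cr numbers (idx + 1) rest

def iter_adjacent_numbers (row : Int) (col : Int) (rows : List String) (number_coordinates : List (List (Int × Int))) (numbers : List Int) : List Int :=
  let rows_count : Int := rows.length
  let cols_count : Int := PySem.Str.len (rows.headD "")   -- rows[0]; Pre_ gives rows ≠ []
  let check_above : Bool := if row > 0 then true else false
  let check_below : Bool := if row + 1 < rows_count then true else false
  let check_left : Bool := if col > 0 then true else false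
  let check_right : Bool := if col + 1 < cols_count then true else false
  pvLoopA row col check_above check_below check_left check_right numbers 0 number_coordinates

-- ===== PORT B =====
-- Source B's first loop: index_at[cell] = index_at.get(cell, []) + [idx]  (a dict.modify)
def pvBuildIndex : Int → List (List (Int × Int)) → PySem.Dict (Int × Int) (List Int) → PySem.Dict (Int × Int) (List Int)
  | _, [], d => d
  | idx, coords :: rest, d =>
      pvBuildIndex (idx + 1) rest (coords.foldl (fun d cell => d.modify cell [] (· ++ [idx])) d)

-- Source B's probe loops over dr, dc with their 'continue' guards, collecting hit indices
def pvHits (row col rows_count cols_count : Int) (index_at : PySem.Dict (Int × Int) (List Int)) : PySem.Set Int :=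
  ([-1, 0, 1] : List Int).foldl (fun s dr =>
    if (dr = -1 ∧ ¬ row > 0) ∨ (dr = 1 ∧ ¬ row + 1 < rows_count) then s
    else ([-1, 0, 1] : List Int).foldl (fun s dc =>
      if (dc = -1 ∧ ¬ col > 0) ∨ (dc = 1 ∧ ¬ col + 1 < cols_count) ∨ (dr = 0 ∧ dc = 0) then s
      else (index_at.getD (row + dr, col + dc) []).foldl (fun s i => PySem.Set.add s i) s) s)
    PySem.Set.empty

def iter_adjacent_numbers_alt (row : Int) (col : Int) (rows : List String) (number_coordinates : List (List (Int × Int))) (numbers : List Int) : List Int :=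
  let rows_count : Int := rows.length
  let cols_count : Int := PySem.Str.len (rows.headD "")   -- rows[0]; Pre_ gives rows ≠ []
  let index_at := pvBuildIndex 0 number_coordinates PySem.Dict.empty
  let hits := pvHits row col rows_count cols_count index_at
  (PySem.List.sorted hits (fun i => i)).map (fun i => (PySem.List.pyGet? numbers i).getD 0)

-- ===== PRECONDITION & SPEC =====
-- pvAdj: cell c is one of the eight neighbors of (row, col) that A's boundary flags allow
-- (a plain closed-form condition on the inputs; used only by Pre_, not by the ports)
def pvAdj (row col rc cc : Int) (c : Int × Int) : Prop :=
  (0 < row ∧ 0 < col ∧ c = (row - 1, col - 1)) ∨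
  (0 < row ∧ c = (row - 1, col)) ∨
  (0 < row ∧ col + 1 < cc ∧ c = (row - 1, col + 1)) ∨
  (0 < col ∧ c = (row, col - 1)) ∨
  (col + 1 < cc ∧ c = (row, col + 1)) ∨
  (row + 1 < rc ∧ 0 < col ∧ c = (row + 1, col - 1)) ∨
  (row + 1 < rc ∧ c = (row + 1, col)) ∨
  (row + 1 < rc ∧ col + 1 < cc ∧ c = (row + 1, col + 1))

-- Pre_ excludes exactly the inputs on which A raises IndexError: empty `rows` (on rows[0]),
-- and inputs where a coordinate list whose index is ≥ len(numbers) contains a checked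
-- neighbor of (row, col) (on numbers[idx] at the yield).
def Pre_iter_adjacent_numbers (row : Int) (col : Int) (rows : List String) (number_coordinates : List (List (Int × Int))) (numbers : List Int) : Prop :=
  rows ≠ [] ∧ ∀ i : Nat, (hi : i < number_coordinates.length) → numbers.length ≤ i →
    ∀ c ∈ number_coordinates[i],
      ¬ pvAdj row col (rows.length : Int) (PySem.Str.len (rows.headD "")) c
instance (row : Int) (col : Int) (rows : List String) (number_coordinates : List (List (Int × Int))) (numbers : List Int) : Decidable (Pre_iter_adjacent_numbers row col rows number_coordinates numbers) := by unfold Pre_iter_adjacent_numbers pvAdj; infer_instance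

def pvWitness_iter_adjacent_numbers : Int × Int × List String × (List (List (Int × Int))) × List Int :=
  (1, 1, ["...", "...", "..."], [[(0, 0)], [(2, 2)], [(5, 5), (1, 2)]], [10, 20, 30])

def Spec_iter_adjacent_numbers (row : Int) (col : Int) (rows : List String) (number_coordinates : List (List (Int × Int))) (numbers : List Int) (out : List Int) : Prop := out = iter_adjacent_numbers_alt row col rows number_coordinates numbers
instance (row : Int) (col : Int) (rows : List String) (number_coordinates : List (List (Int × Int))) (numbers : List Int) (out : List Int) : Decidable (Spec_iter_adjacent_numbers row col rows number_coordinates numbers out) := by unfold Spec_iter_adjacent_numbers; infer_instance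

-- ===== CLAIM (what is proved, stated in full; the proofs are below) =====
def Claim_equal_iter_adjacent_numbers : Prop := ∀ (row : Int) (col : Int) (rows : List String) (number_coordinates : List (List (Int × Int))) (numbers : List Int), Dom_iter_adjacent_numbers row col rows number_coordinates numbers → Pre_iter_adjacent_numbers row col rows number_coordinates numbers → Spec_iter_adjacent_numbers row col rows number_coordinates numbers (iter_adjacent_numbers row col rows number_coordinates numbers)

-- ===== LEMMAS AND PROOFS =====

-- proof-side helper: the set of in-bounds neighbor cells A's flag chain effectively tests
def pvNeighbors (row col rc cc : Int) : PySem.Set (Int × Int) :=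
  let s : PySem.Set (Int × Int) := PySem.Set.empty
  let s := if 0 < row ∧ 0 < col then PySem.Set.add s (row - 1, col - 1) else s
  let s := if 0 < row then PySem.Set.add s (row - 1, col) else s
  let s := if 0 < row ∧ col + 1 < cc then PySem.Set.add s (row - 1, col + 1) else s
  let s := if 0 < col then PySem.Set.add s (row, col - 1) else s
  let s := if col + 1 < cc then PySem.Set.add s (row, col + 1) else s
  let s := if row + 1 < rc ∧ 0 < col then PySem.Set.add s (row + 1, col - 1) else s
  let s := if row + 1 < rc then PySem.Set.add s (row + 1, col) else s
  let s := if row + 1 < rc ∧ col + 1 < cc then PySem.Set.add s (row + 1, col + 1) else s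
  s

set_option maxHeartbeats 1000000 in
theorem pv_mem_neighbors (row col rc cc : Int) (x y : Int) :
    (x, y) ∈ pvNeighbors row col rc cc ↔
      ((0 < row ∧ 0 < col ∧ x = row - 1 ∧ y = col - 1) ∨
       (0 < row ∧ x = row - 1 ∧ y = col) ∨
       (0 < row ∧ col + 1 < cc ∧ x = row - 1 ∧ y = col + 1) ∨
       (0 < col ∧ x = row ∧ y = col - 1) ∨
       (col + 1 < cc ∧ x = row ∧ y = col + 1) ∨
       (row + 1 < rc ∧ 0 < col ∧ x = row + 1 ∧ y = col - 1) ∨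
       (row + 1 < rc ∧ x = row + 1 ∧ y = col) ∨
       (row + 1 < rc ∧ col + 1 < cc ∧ x = row + 1 ∧ y = col + 1)) := by
  by_cases h1 : 0 < row <;> by_cases h2 : row + 1 < rc <;>
    by_cases h3 : 0 < col <;> by_cases h4 : col + 1 < cc <;>
    simp only [pvNeighbors, h1, h2, h3, h4, and_self, and_true, true_and, and_false,
      false_and, if_true, if_false, PySem.Set.mem_add, PySem.Set.empty,
      List.not_mem_nil, Prod.ext_iff] <;>
    tauto

set_option maxHeartbeats 1000000 in
theorem pv_innerA_step (row col rc cc : Int) (v nrow ncol : Int) (rest : List (Int × Int)) :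
    pvInnerA row col (decide (0 < row)) (decide (row + 1 < rc))
        (decide (0 < col)) (decide (col + 1 < cc)) v ((nrow, ncol) :: rest) =
      if (nrow, ncol) ∈ pvNeighbors row col rc cc then [v]
      else pvInnerA row col (decide (0 < row)) (decide (row + 1 < rc))
        (decide (0 < col)) (decide (col + 1 < cc)) v rest := by
  by_cases hm : (nrow, ncol) ∈ pvNeighbors row col rc cc
  · rw [if_pos hm]
    have h8 := (pv_mem_neighbors row col rc cc nrow ncol).mp hm
    rw [pvInnerA]
    rcases h8 with ⟨h1,h2,e1,e2⟩|⟨h1,e1,e2⟩|⟨h1,h2,e1,e2⟩|⟨h1,e1,e2⟩|⟨h1,e1,e2⟩|⟨h1,h2,e1,e2⟩|⟨h1,e1,e2⟩|⟨h1,h2,e1,e2⟩ <;>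
      simp_all [Prod.mk.injEq] <;> omega
  · rw [if_neg hm]
    have h8 := (pv_mem_neighbors row col rc cc nrow ncol).not.mp hm
    push_neg at h8
    rw [pvInnerA]
    rw [if_neg (by simp only [Bool.and_eq_true, decide_eq_true_eq, Prod.mk.injEq]; omega)]
    rw [if_neg (by simp only [Bool.and_eq_true, decide_eq_true_eq, Prod.mk.injEq]; omega)]
    rw [if_neg (by simp only [Bool.and_eq_true, decide_eq_true_eq, Prod.mk.injEq]; omega)]
    rw [if_neg (by simp only [Bool.and_eq_true, decide_eq_true_eq, Prod.mk.injEq]; omega)]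
    rw [if_neg (by simp only [Bool.and_eq_true, decide_eq_true_eq, Prod.mk.injEq]; omega)]
    rw [if_neg (by simp only [Bool.and_eq_true, decide_eq_true_eq, Prod.mk.injEq]; omega)]
    rw [if_neg (by simp only [Bool.and_eq_true, decide_eq_true_eq, Prod.mk.injEq]; omega)]
    rw [if_neg (by simp only [Bool.and_eq_true, decide_eq_true_eq, Prod.mk.injEq]; omega)]

-- isdisjoint on a cons peels the head membership test
theorem pv_isdisjoint_cons (row col rc cc : Int) (c : Int × Int) (rest : List (Int × Int)) :
    PySem.Set.isdisjoint (pvNeighbors row col rc cc) (c :: rest) =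
      (!decide (c ∈ pvNeighbors row col rc cc) &&
        PySem.Set.isdisjoint (pvNeighbors row col rc cc) rest) := by
  rcases hd : PySem.Set.isdisjoint (pvNeighbors row col rc cc) (c :: rest) with _ | _
  · have : ¬ ∀ x ∈ pvNeighbors row col rc cc, x ∉ c :: rest := fun hall =>
      absurd ((PySem.Set.isdisjoint_iff _ _).mpr hall) (by simp [hd])
    push_neg at this
    obtain ⟨x, hx, hx2⟩ := this
    rcases List.mem_cons.mp hx2 with rfl | hx3
    · simp [hx]
    · symm
      simp only [Bool.and_eq_false_iff]
      right
      rcases hr : PySem.Set.isdisjoint (pvNeighbors row col rc cc) rest with _ | _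
      · rfl
      · exact absurd hx3 ((PySem.Set.isdisjoint_iff _ _).mp hr x hx)
  · have hall := (PySem.Set.isdisjoint_iff _ _).mp hd
    have h1 : c ∉ pvNeighbors row col rc cc := fun hc => hall c hc (List.mem_cons_self)
    have h2 : PySem.Set.isdisjoint (pvNeighbors row col rc cc) rest = true :=
      (PySem.Set.isdisjoint_iff _ _).mpr fun x hx hx2 => hall x hx (List.mem_cons_of_mem _ hx2)
    simp [h1, h2]

theorem pv_isdisjoint_nil (row col rc cc : Int) :
    PySem.Set.isdisjoint (pvNeighbors row col rc cc) ([] : List (Int × Int)) = true :=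
  (PySem.Set.isdisjoint_iff _ _).mpr fun _ _ h => (List.not_mem_nil h)

-- A's inner loop yields v exactly when the coordinate list meets the neighbor set
theorem pv_innerA_eq (row col rc cc : Int) (v : Int) (coords : List (Int × Int)) :
    pvInnerA row col (decide (0 < row)) (decide (row + 1 < rc))
        (decide (0 < col)) (decide (col + 1 < cc)) v coords =
      if PySem.Set.isdisjoint (pvNeighbors row col rc cc) coords then [] else [v] := by
  induction coords with
  | nil => simp [pvInnerA, pv_isdisjoint_nil]
  | cons c rest ih =>
    obtain ⟨nrow, ncol⟩ := c
    rw [pv_innerA_step, pv_isdisjoint_cons]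
    by_cases hm : (nrow, ncol) ∈ pvNeighbors row col rc cc
    · simp [hm]
    · rw [if_neg hm, ih]
      have hd : decide ((nrow, ncol) ∈ pvNeighbors row col rc cc) = false := by
        simpa using hm
      rw [hd]
      simp only [Bool.not_false, Bool.true_and]

-- the list of indices (from start k) whose coordinate list meets the neighbor set,
-- in increasing order — the common reference shape for both ports
def pvIdxL (row col rc cc : Int) : Int → List (List (Int × Int)) → List Int
  | _, [] => []
  | k, c :: rest =>
      (if PySem.Set.isdisjoint (pvNeighbors row col rc cc) c then [] else [k])
        ++ pvIdxL row col rc cc (k + 1) rest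

-- A's outer loop maps the numbers lookup over that index list
theorem pv_loopA_eq (row col rc cc : Int) (numbers : List Int) :
    ∀ (ncs : List (List (Int × Int))) (k : Int),
    pvLoopA row col (decide (0 < row)) (decide (row + 1 < rc))
        (decide (0 < col)) (decide (col + 1 < cc)) numbers k ncs =
      (pvIdxL row col rc cc k ncs).map (fun i => (PySem.List.pyGet? numbers i).getD 0) := by
  intro ncs
  induction ncs with
  | nil => intro k; simp [pvLoopA, pvIdxL]
  | cons coords rest ih =>
    intro k
    rw [pvLoopA, pvIdxL, pv_innerA_eq, ih, List.map_append]
    by_cases hd : PySem.Set.isdisjoint (pvNeighbors row col rc cc) coords = true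
    · simp [hd]
    · simp [eq_false_of_ne_true hd]

-- members of pvIdxL k ncs are exactly k + j for j with a meeting coordinate list
theorem pv_mem_idxL (row col rc cc : Int) :
    ∀ (ncs : List (List (Int × Int))) (k i : Int),
    i ∈ pvIdxL row col rc cc k ncs ↔
      ∃ j : Nat, ∃ _ : j < ncs.length, i = k + j ∧
        PySem.Set.isdisjoint (pvNeighbors row col rc cc) ncs[j] = false := by
  intro ncs
  induction ncs with
  | nil => intro k i; simp [pvIdxL]
  | cons coords rest ih =>
    intro k i
    rw [pvIdxL]
    simp only [List.mem_append, ih]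
    constructor
    · rintro (h | ⟨j, hj, rfl, hm⟩)
      · by_cases hd : PySem.Set.isdisjoint (pvNeighbors row col rc cc) coords = true
        · simp [hd] at h
        · rw [if_neg hd] at h
          simp only [List.mem_singleton] at h
          exact ⟨0, by simp, by omega, by simpa using eq_false_of_ne_true hd⟩
      · exact ⟨j + 1, by simpa using Nat.succ_lt_succ hj, by push_cast; ring, by simpa using hm⟩
    · rintro ⟨j, hj, rfl, hm⟩
      cases j with
      | zero =>
        left
        simp only [List.getElem_cons_zero] at hm
        simp [hm]
      | succ j =>
        right
        exact ⟨j, by simpa using Nat.lt_of_succ_lt_succ hj, by push_cast; ring, by simpa using hm⟩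

-- pvIdxL is strictly increasing
theorem pv_pairwise_idxL (row col rc cc : Int) :
    ∀ (ncs : List (List (Int × Int))) (k : Int),
    (pvIdxL row col rc cc k ncs).Pairwise (· < ·) := by
  intro ncs
  induction ncs with
  | nil => intro k; simp [pvIdxL]
  | cons coords rest ih =>
    intro k
    rw [pvIdxL]
    apply List.pairwise_append.mpr
    refine ⟨?_, ih (k + 1), ?_⟩
    · split_ifs <;> simp
    · intro a ha b hb
      have hb' := (pv_mem_idxL row col rc cc rest (k + 1) b).mp hb
      obtain ⟨j, _, rfl, _⟩ := hb'
      have : a = k := by split_ifs at ha <;> simpa using ha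
      omega

-- one coordinate list of the build loop: it appends idx at each of its cells
theorem pv_build_inner_mem (coords : List (Int × Int)) (d : PySem.Dict (Int × Int) (List Int))
    (idx : Int) (cell : Int × Int) (i : Int) :
    i ∈ (coords.foldl (fun d c => d.modify c [] (· ++ [idx])) d).getD cell [] ↔
      i ∈ d.getD cell [] ∨ (i = idx ∧ cell ∈ coords) := by
  have h : coords.foldl (fun d c => d.modify c [] (· ++ [idx])) d
      = ((coords.map (fun c => (c, idx))).foldl (fun d p => d.modify p.1 [] (· ++ [p.2])) d) := by
    rw [List.foldl_map]
  rw [h, PySem.Dict.getD_foldl_modify_append]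
  simp only [List.mem_append, List.filter_map, List.map_map, List.mem_map, List.mem_filter,
    Function.comp]
  constructor
  · rintro (h1 | ⟨c, ⟨hc, hcc⟩, rfl⟩)
    · exact Or.inl h1
    · exact Or.inr ⟨rfl, by rwa [eq_of_beq hcc] at hc⟩
  · rintro (h1 | ⟨rfl, hc⟩)
    · exact Or.inl h1
    · exact Or.inr ⟨cell, ⟨hc, by simp⟩, rfl⟩

-- the full index dict: i is stored at cell iff cell occurs in coordinate list number i
theorem pv_build_mem :
    ∀ (ncs : List (List (Int × Int))) (k : Int) (d : PySem.Dict (Int × Int) (List Int))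
      (cell : Int × Int) (i : Int),
    i ∈ (pvBuildIndex k ncs d).getD cell [] ↔
      i ∈ d.getD cell [] ∨ ∃ j : Nat, ∃ _ : j < ncs.length, i = k + j ∧ cell ∈ ncs[j] := by
  intro ncs
  induction ncs with
  | nil => intro k d cell i; simp [pvBuildIndex]
  | cons coords rest ih =>
    intro k d cell i
    rw [pvBuildIndex, ih, pv_build_inner_mem]
    constructor
    · rintro ((h | ⟨rfl, hc⟩) | ⟨j, hj, rfl, hm⟩)
      · exact Or.inl h
      · exact Or.inr ⟨0, by simp, by omega, by simpa using hc⟩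
      · exact Or.inr ⟨j + 1, by simpa using Nat.succ_lt_succ hj, by push_cast; ring,
          by simpa using hm⟩
    · rintro (h | ⟨j, hj, rfl, hm⟩)
      · exact Or.inl (Or.inl h)
      · cases j with
        | zero => exact Or.inl (Or.inr ⟨by omega, by simpa using hm⟩)
        | succ j =>
          exact Or.inr ⟨j, by simpa using Nat.lt_of_succ_lt_succ hj, by push_cast; ring,
            by simpa using hm⟩

-- hits.add loop over a plain list of indices
theorem pv_mem_fold_add (l : List Int) (s : PySem.Set Int) (i : Int) :
    i ∈ l.foldl (fun s i => PySem.Set.add s i) s ↔ i ∈ s ∨ i ∈ l := by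
  simpa using PySem.Set.mem_foldl_add l (fun x => x) s i

set_option maxHeartbeats 2000000 in
-- the probe loop's hit set, spelled out as the eight guarded lookups
theorem pv_hits_eight (row col rc cc : Int) (d : PySem.Dict (Int × Int) (List Int)) (i : Int) :
    i ∈ pvHits row col rc cc d ↔
      ((0 < row ∧ 0 < col ∧ i ∈ d.getD (row - 1, col - 1) []) ∨
       (0 < row ∧ i ∈ d.getD (row - 1, col) []) ∨
       (0 < row ∧ col + 1 < cc ∧ i ∈ d.getD (row - 1, col + 1) []) ∨
       (0 < col ∧ i ∈ d.getD (row, col - 1) []) ∨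
       (col + 1 < cc ∧ i ∈ d.getD (row, col + 1) []) ∨
       (row + 1 < rc ∧ 0 < col ∧ i ∈ d.getD (row + 1, col - 1) []) ∨
       (row + 1 < rc ∧ i ∈ d.getD (row + 1, col) []) ∨
       (row + 1 < rc ∧ col + 1 < cc ∧ i ∈ d.getD (row + 1, col + 1) [])) := by
  rw [pvHits]
  by_cases h1 : 0 < row <;> by_cases h2 : row + 1 < rc <;>
    by_cases h3 : 0 < col <;> by_cases h4 : col + 1 < cc <;>
    simp only [List.foldl_cons, List.foldl_nil, gt_iff_lt, h1, h2, h3, h4,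
      not_true, not_false_iff, and_true, and_false, true_and, false_and, true_or, or_true,
      false_or, or_false, and_self, if_true, if_false,
      (by norm_num : ¬ ((-1 : Int) = 1)), (by norm_num : ¬ ((1 : Int) = -1)),
      (by norm_num : ¬ ((0 : Int) = 1)), (by norm_num : ¬ ((0 : Int) = -1)),
      (by norm_num : ¬ ((-1 : Int) = 0)), (by norm_num : ¬ ((1 : Int) = 0)),
      pv_mem_fold_add, PySem.Set.empty, List.not_mem_nil, sub_eq_add_neg, add_zero] <;>
    tauto

set_option maxHeartbeats 2000000 in
-- an existential over the neighbor set is the same eight-way disjunction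
theorem pv_exists_neighbor (row col rc cc : Int) (P : Int × Int → Prop) :
    (∃ cell ∈ pvNeighbors row col rc cc, P cell) ↔
      ((0 < row ∧ 0 < col ∧ P (row - 1, col - 1)) ∨
       (0 < row ∧ P (row - 1, col)) ∨
       (0 < row ∧ col + 1 < cc ∧ P (row - 1, col + 1)) ∨
       (0 < col ∧ P (row, col - 1)) ∨
       (col + 1 < cc ∧ P (row, col + 1)) ∨
       (row + 1 < rc ∧ 0 < col ∧ P (row + 1, col - 1)) ∨
       (row + 1 < rc ∧ P (row + 1, col)) ∨
       (row + 1 < rc ∧ col + 1 < cc ∧ P (row + 1, col + 1))) := by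
  constructor
  · rintro ⟨⟨a, b⟩, hmem, hP⟩
    rcases (pv_mem_neighbors row col rc cc a b).mp hmem with
        ⟨u1,u2,rfl,rfl⟩|⟨u1,rfl,rfl⟩|⟨u1,u2,rfl,rfl⟩|⟨u1,rfl,rfl⟩|⟨u1,rfl,rfl⟩|⟨u1,u2,rfl,rfl⟩|⟨u1,rfl,rfl⟩|⟨u1,u2,rfl,rfl⟩ <;>
      tauto
  · rintro (⟨u1,u2,hP⟩|⟨u1,hP⟩|⟨u1,u2,hP⟩|⟨u1,hP⟩|⟨u1,hP⟩|⟨u1,u2,hP⟩|⟨u1,hP⟩|⟨u1,u2,hP⟩)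
    · exact ⟨(row - 1, col - 1), (pv_mem_neighbors row col rc cc _ _).mpr
        (Or.inl ⟨u1, u2, rfl, rfl⟩), hP⟩
    · exact ⟨(row - 1, col), (pv_mem_neighbors row col rc cc _ _).mpr
        (Or.inr (Or.inl ⟨u1, rfl, rfl⟩)), hP⟩
    · exact ⟨(row - 1, col + 1), (pv_mem_neighbors row col rc cc _ _).mpr
        (Or.inr (Or.inr (Or.inl ⟨u1, u2, rfl, rfl⟩))), hP⟩
    · exact ⟨(row, col - 1), (pv_mem_neighbors row col rc cc _ _).mpr
        (Or.inr (Or.inr (Or.inr (Or.inl ⟨u1, rfl, rfl⟩)))), hP⟩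
    · exact ⟨(row, col + 1), (pv_mem_neighbors row col rc cc _ _).mpr
        (Or.inr (Or.inr (Or.inr (Or.inr (Or.inl ⟨u1, rfl, rfl⟩))))), hP⟩
    · exact ⟨(row + 1, col - 1), (pv_mem_neighbors row col rc cc _ _).mpr
        (Or.inr (Or.inr (Or.inr (Or.inr (Or.inr (Or.inl ⟨u1, u2, rfl, rfl⟩)))))), hP⟩
    · exact ⟨(row + 1, col), (pv_mem_neighbors row col rc cc _ _).mpr
        (Or.inr (Or.inr (Or.inr (Or.inr (Or.inr (Or.inr (Or.inl ⟨u1, rfl, rfl⟩))))))), hP⟩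
    · exact ⟨(row + 1, col + 1), (pv_mem_neighbors row col rc cc _ _).mpr
        (Or.inr (Or.inr (Or.inr (Or.inr (Or.inr (Or.inr (Or.inr ⟨u1, u2, rfl, rfl⟩))))))), hP⟩

set_option maxHeartbeats 2000000 in
-- membership in the probe loop's hit set = some allowed neighbor cell stores i
theorem pv_mem_hits (row col rc cc : Int) (d : PySem.Dict (Int × Int) (List Int)) (i : Int) :
    i ∈ pvHits row col rc cc d ↔
      ∃ cell ∈ pvNeighbors row col rc cc, i ∈ d.getD cell [] := by
  rw [pv_hits_eight]
  exact (pv_exists_neighbor row col rc cc (fun cell => i ∈ d.getD cell [])).symm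

-- isdisjoint = false means a common element
theorem pv_isdisjoint_false_iff {α : Type} [BEq α] [LawfulBEq α]
    (s : PySem.Set α) (t : List α) :
    PySem.Set.isdisjoint s t = false ↔ ∃ x ∈ s, x ∈ t := by
  rw [Bool.eq_false_iff, Ne, PySem.Set.isdisjoint_iff]
  push_neg
  simp

-- a fold preserving a predicate
theorem pv_foldl_preserve {σ β : Type} (P : σ → Prop) (f : σ → β → σ)
    (h : ∀ s x, P s → P (f s x)) : ∀ (l : List β) (s : σ), P s → P (l.foldl f s) := by
  intro l
  induction l with
  | nil => intro s hs; simpa using hs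
  | cons x xs ih => intro s hs; exact ih _ (h s x hs)

-- the hit set has no duplicates
theorem pv_nodup_hits (row col rc cc : Int) (d : PySem.Dict (Int × Int) (List Int)) :
    (pvHits row col rc cc d).Nodup := by
  rw [pvHits]
  apply pv_foldl_preserve List.Nodup _ ?_ _ _ (by simp [PySem.Set.empty])
  intro s dr hs
  dsimp only
  split_ifs with h
  · exact hs
  · apply pv_foldl_preserve List.Nodup _ ?_ _ _ hs
    intro s dc hs
    dsimp only
    split_ifs with h
    · exact hs
    · exact pv_foldl_preserve List.Nodup _ (fun s i hs => PySem.Set.nodup_add s i hs) _ _ hs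

-- the two ports compute the same list (on every input)
theorem pv_ports_eq (row col : Int) (rows : List String)
    (ncs : List (List (Int × Int))) (numbers : List Int) :
    iter_adjacent_numbers row col rows ncs numbers
      = iter_adjacent_numbers_alt row col rows ncs numbers := by
  unfold iter_adjacent_numbers iter_adjacent_numbers_alt
  have hflag : ∀ p : Prop, ∀ _ : Decidable p, (if p then true else false) = decide p := by
    intro p hp; by_cases h : p <;> simp [h]
  simp only [gt_iff_lt, hflag]
  rw [pv_loopA_eq row col (rows.length : Int) (PySem.Str.len (rows.headD "")) numbers ncs 0]
  rw [PySem.List.sorted_eq_of_perm_of_pairwise_lt _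
        (pvIdxL row col (rows.length : Int) (PySem.Str.len (rows.headD "")) 0 ncs)
        (fun i => i) ?_ ?_]
  · refine (List.perm_ext_iff_of_nodup
      ((pv_pairwise_idxL _ _ _ _ ncs 0).imp (fun h => ne_of_lt h))
      (pv_nodup_hits _ _ _ _ _)).mpr ?_
    intro a
    rw [pv_mem_idxL, pv_mem_hits]
    constructor
    · rintro ⟨j, hj, rfl, hm⟩
      obtain ⟨x, hx, hxc⟩ := (pv_isdisjoint_false_iff _ _).mp hm
      exact ⟨x, hx, (pv_build_mem ncs 0 PySem.Dict.empty x _).mpr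
        (Or.inr ⟨j, hj, rfl, hxc⟩)⟩
    · rintro ⟨cell, hcell, hm⟩
      rcases (pv_build_mem ncs 0 PySem.Dict.empty cell a).mp hm with h0 | ⟨j, hj, rfl, hc⟩
      · simp [PySem.Dict.getD_empty] at h0
      · exact ⟨j, hj, rfl, (pv_isdisjoint_false_iff _ _).mpr ⟨cell, hcell, hc⟩⟩
  · exact pv_pairwise_idxL _ _ _ _ ncs 0

theorem iter_adjacent_numbers_spec : Claim_equal_iter_adjacent_numbers := by
  intro row col rows ncs numbers _dom _pre
  unfold Spec_iter_adjacent_numbers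
  exact pv_ports_eq row col rows ncs numbers
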